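-- pv_equiv track=rewrite | github.com/WGLab/SCOTCH | src/annotation.py | update_exons
-- ===== SOURCE A (Python) =====
-- def update_exons(A, B, distance_threshold = 20):
--     ##B is reference
--     ##A is based on bam
--     def correct_point(point, reference_points, threshold = distance_threshold):
--         closest_point = None
--         min_distance = float('inf')
--         for ref_point in reference_points:
--             distance = abs(point - ref_point)
--             if distance < threshold and distance < min_distance:
--                 closest_point = ref_point
--                 min_distance = distance
--         return closest_point if closest_point is not None else point
--     def partition_intervals(A, B):
--         all_intervals = A + B
--         all_intervals.sort()
--         partitions = []
--         current_start, current_end = all_intervals[0]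
--         for start, end in all_intervals[1:]:
--             if start >= current_end:
--                 if current_start < current_end:
--                     partitions.append((current_start, current_end))
--                 current_start, current_end = start, end
--             else:
--                 temp = [current_start, current_end, start, end]
--                 temp.sort()
--                 for i in [0, 1]:
--                     if temp[i]<temp[i + 1]:
--                         partitions.append((temp[i], temp[i + 1]))
--                 current_start, current_end = temp[2], temp[3]
--         if current_start<current_end:
--             partitions.append((current_start, current_end))
--         return partitions
--     if len(A)==0:
--         return B
--     if len(B)==1:
--         return B
--     reference_points = [point for segment in B for point in segment]
--     corrected_A = []
--     for start, end in A:
--         corrected_start = correct_point(start, reference_points)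
--         corrected_end = correct_point(end, reference_points)
--         corrected_A.append((corrected_start, corrected_end))
--     corrected_A = [(a,b) for a,b in corrected_A if a<b]
--     return partition_intervals(corrected_A,B)
-- ===== SOURCE B (Python) =====
-- def update_exons(A, B, distance_threshold=20):
--     # Re-implementation: snap endpoints via a sorted unique reference array +
--     # hand-rolled binary search (first-occurrence tie-break kept via an index map),
--     # then one sweep to partition.  Return-value equivalent to the original.
--     if len(A) == 0:
--         return B
--     if len(B) == 1:
--         return B
--     refs = [p for seg in B for p in seg]
--     first_idx = {}
--     for i, v in enumerate(refs):
--         if v not in first_idx: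
--             first_idx[v] = i
--     vals = sorted(first_idx)
--
--     def snap(p):
--         lo, hi = 0, len(vals)
--         while lo < hi:
--             mid = (lo + hi) // 2
--             if vals[mid] < p:
--                 lo = mid + 1
--             else:
--                 hi = mid
--         best = None  # (distance, first occurrence index, value)
--         for j in (lo - 1, lo):
--             if 0 <= j < len(vals):
--                 v = vals[j]
--                 d = abs(p - v)
--                 if d < distance_threshold:
--                     cand = (d, first_idx[v], v)
--                     if best is None or cand < best:
--                         best = cand
--         return p if best is None else best[2]
--
--     corrected = [(snap(s), snap(e)) for s, e in A]
--     merged = sorted([(a, b) for a, b in corrected if a < b] + B)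
--     partitions = []
--     if not merged:
--         return partitions
--     cs, ce = merged[0]
--     for s, e in merged[1:]:
--         if s >= ce:
--             if cs < ce:
--                 partitions.append((cs, ce))
--             cs, ce = s, e
--         else:
--             t0, t1, t2, t3 = sorted((cs, ce, s, e))
--             if t0 < t1:
--                 partitions.append((t0, t1))
--             if t1 < t2:
--                 partitions.append((t1, t2))
--             cs, ce = t2, t3
--     if cs < ce:
--         partitions.append((cs, ce))
--     return partitions
-- ===== Notes on version B (the rewrite author's own statement) =====
-- stated objective: faster
-- what changed: Endpoint snapping no longer scans all reference points per endpoint: B sorts the distinct reference values once and binary-searches the two nearest neighbours, keeping A's first-occurrence tie-break via a value->first-index map; the partition sweep destructures one sorted 4-tuple instead of an indexed inner loop.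
import Mathlib
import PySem

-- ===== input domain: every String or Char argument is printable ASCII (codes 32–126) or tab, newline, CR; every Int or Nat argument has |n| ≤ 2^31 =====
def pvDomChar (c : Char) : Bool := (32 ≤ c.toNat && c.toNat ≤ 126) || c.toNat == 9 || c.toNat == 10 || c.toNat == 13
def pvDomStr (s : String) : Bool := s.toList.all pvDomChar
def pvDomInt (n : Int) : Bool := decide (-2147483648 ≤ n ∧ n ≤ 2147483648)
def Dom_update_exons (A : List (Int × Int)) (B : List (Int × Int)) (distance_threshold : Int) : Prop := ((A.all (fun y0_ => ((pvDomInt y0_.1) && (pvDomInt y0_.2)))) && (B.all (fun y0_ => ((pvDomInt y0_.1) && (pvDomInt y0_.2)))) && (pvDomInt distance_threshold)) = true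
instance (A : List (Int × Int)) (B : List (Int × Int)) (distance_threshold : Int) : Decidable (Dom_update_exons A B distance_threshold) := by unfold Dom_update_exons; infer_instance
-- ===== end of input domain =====

-- B snaps each endpoint via a sorted unique reference array + binary search (keeping A's
-- first-occurrence tie-break through a first-index map) instead of A's per-point linear scan;
-- return-value equivalent on Pre_ (A raises IndexError outside it).

-- ===== PORT A =====
-- loop body of A's correct_point: keep the closest admissible reference point seen so far
def pvCorrectStep (threshold point : Int) (st : Option (Int × Int)) (ref_point : Int) : Option (Int × Int) :=
  let distance := |point - ref_point|
  match st with
  | none => if distance < threshold then some (ref_point, distance) else none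
  | some (cp, md) =>
      if distance < threshold ∧ distance < md then some (ref_point, distance) else some (cp, md)

def pvCorrectPoint (threshold : Int) (reference_points : List Int) (point : Int) : Int :=
  match reference_points.foldl (pvCorrectStep threshold point) none with
  | some (cp, _) => cp
  | none => point

-- loop body of A's partition_intervals (state: partitions, current_start, current_end)
def pvPartStepA (st : List (Int × Int) × Int × Int) (se : Int × Int) : List (Int × Int) × Int × Int :=
  let parts := st.1
  let cs := st.2.1
  let ce := st.2.2
  if se.1 ≥ ce then
    (if cs < ce then parts ++ [(cs, ce)] else parts, se.1, se.2)
  else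
    let temp := PySem.List.sorted [cs, ce, se.1, se.2] (fun x => x) false
    let parts2 := ([0, 1] : List Int).foldl
      (fun ps i =>
        if PySem.List.pyGetD temp i 0 < PySem.List.pyGetD temp (i + 1) 0 then
          ps ++ [(PySem.List.pyGetD temp i 0, PySem.List.pyGetD temp (i + 1) 0)]
        else ps) parts
    (parts2, PySem.List.pyGetD temp 2 0, PySem.List.pyGetD temp 3 0)

-- A's partition_intervals (already given A+B concatenated).
-- The [] branch is where Python raises IndexError on all_intervals[0]; excluded by Pre_.
def pvPartitionA (all0 : List (Int × Int)) : List (Int × Int) :=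
  let all_intervals := PySem.List.sorted2 all0 (fun p => p.1) (fun p => p.2)
  match all_intervals with
  | [] => []
  | (c0, e0) :: rest =>
    let st := rest.foldl pvPartStepA ([], c0, e0)
    if st.2.1 < st.2.2 then st.1 ++ [(st.2.1, st.2.2)] else st.1

def update_exons (A : List (Int × Int)) (B : List (Int × Int)) (distance_threshold : Int) : List (Int × Int) :=
  if PySem.List.len A = 0 then B
  else if PySem.List.len B = 1 then B
  else
    let reference_points := B.foldl (fun acc segment => acc ++ [segment.1, segment.2]) []
    let corrected_A := A.foldl
      (fun acc se =>
        acc ++ [(pvCorrectPoint distance_threshold reference_points se.1,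
                 pvCorrectPoint distance_threshold reference_points se.2)]) []
    let corrected_A2 := corrected_A.filter (fun p => decide (p.1 < p.2))
    pvPartitionA (corrected_A2 ++ B)

-- ===== PORT B =====
-- first_idx dict of Source B: value -> index of its first occurrence in refs
def pvBuildIdx (refs : List Int) : PySem.Dict Int Int :=
  (PySem.List.enumerate refs).foldl
    (fun d vi => if d.contains vi.2 then d else d.insert vi.2 vi.1) PySem.Dict.empty

-- hand-written bisect-left loop of Source B (vals[mid] is always in range; getD is exact there);
-- fuel ≥ hi - lo only makes the while-loop structural — it is never exhausted.
def pvBisect (vals : List Int) (p : Int) : Nat → Nat → Nat → Nat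
  | 0, lo, _ => lo
  | fuel + 1, lo, hi =>
    if lo < hi then
      let mid := (lo + hi) / 2
      if vals.getD mid 0 < p then pvBisect vals p fuel (mid + 1) hi
      else pvBisect vals p fuel lo mid
    else lo

-- candidate loop body of Source B's snap: Python's tuple '<' on (distance, first index, value)
-- written out lexicographically; first_idx[v] is exact as getD since v ∈ vals is always a key.
def pvSnapStep (thr : Int) (vals : List Int) (idx : PySem.Dict Int Int) (p : Int)
    (best : Option (Int × Int × Int)) (j : Int) : Option (Int × Int × Int) :=
  if 0 ≤ j ∧ j < PySem.List.len vals then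
    let v := PySem.List.pyGetD vals j 0
    let d := |p - v|
    if d < thr then
      let i := idx.getD v 0
      match best with
      | none => some (d, i, v)
      | some (bd, bi, bv) =>
          if d < bd ∨ (d = bd ∧ (i < bi ∨ (i = bi ∧ v < bv))) then some (d, i, v)
          else some (bd, bi, bv)
    else best
  else best

def pvSnap (thr : Int) (vals : List Int) (idx : PySem.Dict Int Int) (p : Int) : Int :=
  let lo := pvBisect vals p vals.length 0 vals.length
  match ([(lo : Int) - 1, (lo : Int)]).foldl (pvSnapStep thr vals idx p) none with
  | none => p
  | some (_, _, v) => v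

-- partition loop body of Source B: destructure the sorted 4-tuple (the `_` arm is unreachable:
-- a sorted 4-list has 4 elements)
def pvPartStepB (st : List (Int × Int) × Int × Int) (se : Int × Int) : List (Int × Int) × Int × Int :=
  let parts := st.1
  let cs := st.2.1
  let ce := st.2.2
  if se.1 ≥ ce then
    (if cs < ce then parts ++ [(cs, ce)] else parts, se.1, se.2)
  else
    match PySem.List.sorted [cs, ce, se.1, se.2] (fun x => x) false with
    | [t0, t1, t2, t3] =>
      let ps := if t0 < t1 then parts ++ [(t0, t1)] else parts
      let ps2 := if t1 < t2 then ps ++ [(t1, t2)] else ps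
      (ps2, t2, t3)
    | _ => st

def update_exons_alt (A : List (Int × Int)) (B : List (Int × Int)) (distance_threshold : Int) : List (Int × Int) :=
  if PySem.List.len A = 0 then B
  else if PySem.List.len B = 1 then B
  else
    let refs := B.flatMap (fun seg => [seg.1, seg.2])
    let idx := pvBuildIdx refs
    let vals := PySem.List.sorted idx.keys (fun x => x) false
    let corrected := A.map
      (fun se => (pvSnap distance_threshold vals idx se.1, pvSnap distance_threshold vals idx se.2))
    let merged := PySem.List.sorted2
      (corrected.filter (fun p => decide (p.1 < p.2)) ++ B) (fun p => p.1) (fun p => p.2)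
    match merged with
    | [] => []
    | (c0, e0) :: rest =>
      let st := rest.foldl pvPartStepB ([], c0, e0)
      if st.2.1 < st.2.2 then st.1 ++ [(st.2.1, st.2.2)] else st.1

-- ===== PRECONDITION & SPEC =====
-- Pre_ excludes exactly the inputs where A raises IndexError: A nonempty, B empty and no
-- interval of A proper (nothing survives the a<b filter, so all_intervals[0] hits an empty list).
def Pre_update_exons (A : List (Int × Int)) (B : List (Int × Int)) (distance_threshold : Int) : Prop :=
  A = [] ∨ B ≠ [] ∨ ∃ p ∈ A, p.1 < p.2
instance (A : List (Int × Int)) (B : List (Int × Int)) (distance_threshold : Int) : Decidable (Pre_update_exons A B distance_threshold) := by unfold Pre_update_exons; infer_instance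

def pvWitness_update_exons : (List (Int × Int)) × (List (Int × Int)) × Int :=
  ([(1, 5), (30, 28)], [(0, 4), (10, 12)], 3)

def Spec_update_exons (A : List (Int × Int)) (B : List (Int × Int)) (distance_threshold : Int) (out : List (Int × Int)) : Prop := out = update_exons_alt A B distance_threshold
instance (A : List (Int × Int)) (B : List (Int × Int)) (distance_threshold : Int) (out : List (Int × Int)) : Decidable (Spec_update_exons A B distance_threshold out) := by unfold Spec_update_exons; infer_instance

-- ===== CLAIM (what is proved, stated in full; the proofs are below) =====
def Claim_equal_update_exons : Prop := ∀ (A : List (Int × Int)) (B : List (Int × Int)) (distance_threshold : Int), Dom_update_exons A B distance_threshold → Pre_update_exons A B distance_threshold → Spec_update_exons A B distance_threshold (update_exons A B distance_threshold)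


-- ===== LEMMAS AND PROOFS =====

lemma pv_len4 {l : List Int} (h : l.length = 4) : ∃ a b c d, l = [a, b, c, d] := by
  match l, h with
  | [a, b, c, d], _ => exact ⟨a, b, c, d, rfl⟩

lemma pv_sort4 (a b c d : Int) :
    ∃ t0 t1 t2 t3, PySem.List.sorted [a, b, c, d] (fun x => x) false = [t0, t1, t2, t3] :=
  pv_len4 (by rw [PySem.List.length_sorted]; rfl)

lemma pv_sorted_mono (l : List Int) (hp : l.Pairwise (· < ·)) {i j : Nat}
    (hi : i < l.length) (hj : j < l.length) (hij : i ≤ j) : l[i] ≤ l[j] := by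
  rcases Nat.lt_or_ge i j with h | h
  · exact le_of_lt (List.pairwise_iff_getElem.mp hp i j hi hj h)
  · have : i = j := by omega
    subst this; rfl

-- the two partition loop bodies agree
lemma pvPartStep_eq : pvPartStepA = pvPartStepB := by
  funext st se
  unfold pvPartStepA pvPartStepB
  by_cases hov : se.1 ≥ st.2.2
  · simp only [if_pos hov]
  · simp only [if_neg hov]
    obtain ⟨t0, t1, t2, t3, heq⟩ := pv_sort4 st.2.1 st.2.2 se.1 se.2
    rw [heq]
    simp only [List.foldl_cons, List.foldl_nil]
    norm_num [PySem.List.pyGetD_ofNat']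

-- ===== first_idx dict: lookups are first-occurrence indices =====
lemma pvBuildIdx_go (refs : List Int) : ∀ (i0 : Int) (d : PySem.Dict Int Int),
    (∀ v, ((PySem.List.enumerate refs i0).foldl
        (fun d vi => if d.contains vi.2 then d else d.insert vi.2 vi.1) d).get? v
      = if d.contains v then d.get? v
        else if v ∈ refs then some (i0 + (List.idxOf v refs : Int)) else none)
    ∧ ((PySem.List.enumerate refs i0).foldl
        (fun d vi => if d.contains vi.2 then d else d.insert vi.2 vi.1) d).keys
      = PySem.Set.update d.keys refs := by
  induction refs with
  | nil =>
    intro i0 d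
    constructor
    · intro v
      by_cases hc : d.contains v = true
      · simp [PySem.List.enumerate, hc]
      · simp [PySem.List.enumerate, hc, PySem.Dict.get?_eq_none_iff_contains]
    · simp [PySem.List.enumerate, PySem.Set.update_nil]
  | cons x xs ih =>
    intro i0 d
    have hen : PySem.List.enumerate (x :: xs) i0 = (i0, x) :: PySem.List.enumerate xs (i0 + 1) := by
      simp [PySem.List.enumerate]
    rw [hen]
    simp only [List.foldl_cons]
    by_cases hcx : d.contains x = true
    · simp only [if_pos hcx]
      refine ⟨?_, ?_⟩
      · intro v
        rw [(ih (i0 + 1) d).1 v]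
        by_cases hc : d.contains v = true
        · rw [if_pos hc, if_pos hc]
        · rw [if_neg hc, if_neg hc]
          by_cases hvx : v = x
          · exact absurd hcx (hvx ▸ hc)
          · simp only [List.mem_cons, hvx, false_or]
            by_cases hmem : v ∈ xs
            · rw [if_pos hmem, if_pos hmem, List.idxOf_cons_ne _ (fun h => hvx h.symm)]
              congr 1
              push_cast
              ring
            · rw [if_neg hmem, if_neg hmem]
      · rw [(ih (i0 + 1) d).2, PySem.Set.update_cons,
          PySem.Set.add_of_mem ((PySem.Dict.contains_iff_mem_keys d x).mp hcx)]
    · simp only [if_neg hcx]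
      have hcxf : d.contains x = false := by revert hcx; cases d.contains x <;> simp
      have hxkeys : x ∉ d.keys := fun hm => hcx ((PySem.Dict.contains_iff_mem_keys d x).mpr hm)
      refine ⟨?_, ?_⟩
      · intro v
        rw [(ih (i0 + 1) (d.insert x i0)).1 v]
        by_cases hvx : v = x
        · subst hvx
          have hci : (d.insert v i0).contains v = true := by
            rw [PySem.Dict.contains_insert]
            simp
          rw [if_pos hci, PySem.Dict.get?_insert_self, if_neg hcx]
          simp [List.idxOf_cons_self]
        · have hci : (d.insert x i0).contains v = d.contains v := by
            rw [PySem.Dict.contains_insert]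
            simp [hvx]
          rw [hci]
          by_cases hc : d.contains v = true
          · rw [if_pos hc, if_pos hc, PySem.Dict.get?_insert_of_ne]
            exact hvx
          · rw [if_neg hc, if_neg hc]
            simp only [List.mem_cons, hvx, false_or]
            by_cases hmem : v ∈ xs
            · rw [if_pos hmem, if_pos hmem, List.idxOf_cons_ne _ (fun h => hvx h.symm)]
              congr 1
              push_cast
              ring
            · rw [if_neg hmem, if_neg hmem]
      · rw [(ih (i0 + 1) (d.insert x i0)).2, PySem.Set.update_cons]
        congr 1
        rw [PySem.Set.add_of_not_mem hxkeys]
        exact PySem.Dict.keys_insert_of_not_contains d i0 hcxf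

lemma pvBuildIdx_get? (refs : List Int) (v : Int) :
    (pvBuildIdx refs).get? v = if v ∈ refs then some ((List.idxOf v refs : Int)) else none := by
  have h := (pvBuildIdx_go refs 0 PySem.Dict.empty).1 v
  unfold pvBuildIdx
  rw [h]
  simp [PySem.Dict.contains_empty]

lemma pvBuildIdx_keys (refs : List Int) : (pvBuildIdx refs).keys = PySem.Set.ofList refs := by
  have h := (pvBuildIdx_go refs 0 PySem.Dict.empty).2
  unfold pvBuildIdx
  rw [h, PySem.Dict.keys_empty, PySem.Set.update_nil_left]

-- ===== bisect-left loop: r ≤ |vals| and i < r ↔ vals[i] < p =====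
lemma pvBisect_spec (vals : List Int) (p : Int) (hp : vals.Pairwise (· < ·)) :
    ∀ (fuel lo hi : Nat), hi - lo ≤ fuel → lo ≤ hi → hi ≤ vals.length →
    (∀ i (h : i < vals.length), i < lo → vals[i] < p) →
    (∀ i (h : i < vals.length), hi ≤ i → ¬ vals[i] < p) →
    pvBisect vals p fuel lo hi ≤ vals.length ∧
    (∀ i (h : i < vals.length), (i < pvBisect vals p fuel lo hi ↔ vals[i] < p)) := by
  intro fuel
  induction fuel with
  | zero =>
    intro lo hi hf hlh hhl hlow hhigh
    have hle : hi = lo := by omega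
    subst hle
    simp only [pvBisect]
    refine ⟨by omega, ?_⟩
    intro i h
    constructor
    · intro hi2; exact hlow i h hi2
    · intro hv; by_contra hge; exact hhigh i h (by omega) hv
  | succ fuel ih =>
    intro lo hi hf hlh hhl hlow hhigh
    simp only [pvBisect]
    by_cases hlt : lo < hi
    · rw [if_pos hlt]
      have hmlo : lo ≤ (lo + hi) / 2 := by omega
      have hmhi : (lo + hi) / 2 < hi := by omega
      have hmlen : (lo + hi) / 2 < vals.length := by omega
      rw [List.getD_eq_getElem vals 0 hmlen]
      by_cases hv : vals[(lo + hi) / 2] < p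
      · rw [if_pos hv]
        exact ih ((lo + hi) / 2 + 1) hi (by omega) (by omega) hhl
          (fun i h hi2 => lt_of_le_of_lt (pv_sorted_mono vals hp h hmlen (by omega)) hv)
          hhigh
      · rw [if_neg hv]
        exact ih lo ((lo + hi) / 2) (by omega) (by omega) (by omega) hlow
          (fun i h hmi hvi => hv (lt_of_le_of_lt (pv_sorted_mono vals hp hmlen h hmi) hvi))
    · rw [if_neg hlt]
      have hle : hi = lo := by omega
      subst hle
      refine ⟨by omega, ?_⟩
      intro i h
      constructor
      · intro hi2; exact hlow i h hi2
      · intro hv; by_contra hge; exact hhigh i h (by omega) hv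

-- ===== invariant of A's correct_point scan =====
def pvInvA (thr p : Int) (refs xs : List Int) (st : Option (Int × Int)) : Prop :=
  (st = none ∧ ∀ r ∈ xs, thr ≤ |p - r|) ∨
  (∃ c, c ∈ xs ∧ st = some (c, |p - c|) ∧ |p - c| < thr ∧
    ∀ r ∈ xs, |p - r| < thr →
      (|p - c| < |p - r| ∨ (|p - c| = |p - r| ∧ List.idxOf c refs ≤ List.idxOf r refs)))

lemma pvInvA_step (thr p : Int) (refs xs ys : List Int) (y : Int) (st : Option (Int × Int))
    (hrefs : refs = xs ++ y :: ys) (h : pvInvA thr p refs xs st) :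
    pvInvA thr p refs (xs ++ [y]) (pvCorrectStep thr p st y) := by
  rcases h with ⟨hst, hall⟩ | ⟨c, hcmem, hst, hadm, hmin⟩
  · subst hst
    simp only [pvCorrectStep]
    by_cases hy : |p - y| < thr
    · rw [if_pos hy]
      right
      refine ⟨y, by simp, rfl, hy, ?_⟩
      intro r hr hradm
      rcases List.mem_append.mp hr with hr | hr
      · exact absurd hradm (by have := hall r hr; omega)
      · simp only [List.mem_singleton] at hr; subst hr
        right; exact ⟨rfl, le_refl _⟩
    · rw [if_neg hy]
      left
      refine ⟨rfl, ?_⟩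
      intro r hr
      rcases List.mem_append.mp hr with hr | hr
      · exact hall r hr
      · simp only [List.mem_singleton] at hr; subst hr; omega
  · subst hst
    simp only [pvCorrectStep]
    by_cases hy : |p - y| < thr ∧ |p - y| < |p - c|
    · rw [if_pos hy]
      right
      refine ⟨y, by simp, rfl, hy.1, ?_⟩
      intro r hr hradm
      rcases List.mem_append.mp hr with hr | hr
      · left
        rcases hmin r hr hradm with h1 | ⟨h1, _⟩ <;> omega
      · simp only [List.mem_singleton] at hr; subst hr
        right; exact ⟨rfl, le_refl _⟩
    · rw [if_neg hy]
      right
      refine ⟨c, List.mem_append_left _ hcmem, rfl, hadm, ?_⟩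
      intro r hr hradm
      rcases List.mem_append.mp hr with hr | hr
      · exact hmin r hr hradm
      · simp only [List.mem_singleton] at hr; subst hr
        have hle : |p - c| ≤ |p - r| := by
          by_contra hlt
          exact hy ⟨hradm, by omega⟩
        rcases lt_or_eq_of_le hle with hlt | heq
        · exact Or.inl hlt
        · right
          refine ⟨heq, ?_⟩
          by_cases hyx : r ∈ xs
          · rcases hmin r hyx hradm with h1 | ⟨_, h2⟩
            · omega
            · exact h2
          · have hidxr : List.idxOf r refs = xs.length := by
              rw [hrefs, List.idxOf_append_of_notMem hyx, List.idxOf_cons_self]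
              omega
            have hidxc : List.idxOf c refs < xs.length := by
              rw [hrefs, List.idxOf_append_of_mem hcmem]
              exact List.idxOf_lt_length_iff.mpr hcmem
            omega

lemma pvFoldA (thr p : Int) (refs : List Int) :
    ∀ (ys xs : List Int) (st), refs = xs ++ ys → pvInvA thr p refs xs st →
      pvInvA thr p refs refs (ys.foldl (pvCorrectStep thr p) st) := by
  intro ys
  induction ys with
  | nil =>
    intro xs st h hinv
    rw [List.foldl_nil]
    rw [List.append_nil] at h
    subst h
    exact hinv
  | cons y ys ih =>
    intro xs st h hinv
    rw [List.foldl_cons]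
    exact ih (xs ++ [y]) _ (by rw [h]; simp) (pvInvA_step thr p refs xs ys y st h hinv)

lemma pvCorrect_char (thr p : Int) (refs : List Int) :
    pvInvA thr p refs refs (refs.foldl (pvCorrectStep thr p) none) :=
  pvFoldA thr p refs refs [] none (by simp) (Or.inl ⟨rfl, by simp⟩)

-- ===== snapping equivalence =====
lemma pvSnap_eq (thr : Int) (refs : List Int) (p : Int) :
    pvSnap thr (PySem.List.sorted (PySem.Set.ofList refs) (fun x => x) false) (pvBuildIdx refs) p
      = pvCorrectPoint thr refs p := by
  set vals := PySem.List.sorted (PySem.Set.ofList refs) (fun x => x) false with hvals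
  set idx := pvBuildIdx refs with hidxdef
  have hpair : vals.Pairwise (· < ·) := PySem.List.sorted_ofList_pairwise_lt refs
  have hmem : ∀ v : Int, v ∈ vals ↔ v ∈ refs := fun v => by
    rw [hvals, PySem.List.mem_sorted, PySem.Set.mem_ofList]
  have hvalmem : ∀ (k : Nat) (hk : k < vals.length), vals[k] ∈ refs :=
    fun k hk => (hmem _).mp (List.getElem_mem hk)
  have hidx : ∀ v ∈ refs, idx.getD v 0 = ((List.idxOf v refs : Nat) : Int) := by
    intro v hv
    rw [hidxdef, PySem.Dict.getD_eq_get?_getD, pvBuildIdx_get?, if_pos hv]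
    rfl
  obtain ⟨hloL, hiff⟩ := pvBisect_spec vals p hpair vals.length 0 vals.length (by omega) (by omega)
    (le_refl _) (fun i h hi => absurd hi (by omega)) (fun i h hge => absurd h (by omega))
  simp only [pvSnap]
  set lo := pvBisect vals p vals.length 0 vals.length with hlodef
  simp only [List.foldl_cons, List.foldl_nil]
  -- evaluation of the candidate step at an in-range / out-of-range index
  have hstep_none : ∀ (k : Nat) (hk : k < vals.length),
      pvSnapStep thr vals idx p none (k : Int)
        = if |p - vals[k]| < thr then some (|p - vals[k]|, idx.getD vals[k] 0, vals[k])
          else none := by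
    intro k hk
    simp only [pvSnapStep, PySem.List.len_eq]
    rw [if_pos (⟨by omega, by exact_mod_cast hk⟩ : (0:Int) ≤ (k:Int) ∧ (k:Int) < (vals.length : Int))]
    rw [PySem.List.pyGetD_natCast, List.getD_eq_getElem _ _ hk]
  have hstep_some : ∀ (k : Nat) (hk : k < vals.length) (bd bi bv : Int),
      pvSnapStep thr vals idx p (some (bd, bi, bv)) (k : Int)
        = if |p - vals[k]| < thr then
            (if |p - vals[k]| < bd ∨ (|p - vals[k]| = bd ∧ (idx.getD vals[k] 0 < bi ∨
                (idx.getD vals[k] 0 = bi ∧ vals[k] < bv))) then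
              some (|p - vals[k]|, idx.getD vals[k] 0, vals[k])
            else some (bd, bi, bv))
          else some (bd, bi, bv) := by
    intro k hk bd bi bv
    simp only [pvSnapStep, PySem.List.len_eq]
    rw [if_pos (⟨by omega, by exact_mod_cast hk⟩ : (0:Int) ≤ (k:Int) ∧ (k:Int) < (vals.length : Int))]
    rw [PySem.List.pyGetD_natCast, List.getD_eq_getElem _ _ hk]
  have hstep_out : ∀ (best : Option (Int × Int × Int)) (j : Int),
      ¬(0 ≤ j ∧ j < (vals.length : Int)) → pvSnapStep thr vals idx p best j = best := by
    intro best j hj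
    simp only [pvSnapStep, PySem.List.len_eq]
    rw [if_neg hj]
  have hchar := pvCorrect_char thr p refs
  simp only [pvCorrectPoint]
  rcases hchar with ⟨hst, hinadm⟩ | ⟨c, hcmem, hst, hadm, hmin⟩
  · -- no admissible reference point: both sides return p
    rw [hst]
    have he1 : pvSnapStep thr vals idx p none ((lo : Int) - 1) = none := by
      by_cases h1 : 1 ≤ lo
      · rw [(by omega : ((lo : Int) - 1) = ((lo - 1 : Nat) : Int)),
          hstep_none (lo - 1) (by omega),
          if_neg (by have := hinadm _ (hvalmem (lo - 1) (by omega)); omega)]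
      · exact hstep_out _ _ (by omega)
    have he2 : pvSnapStep thr vals idx p none ((lo : Int)) = none := by
      by_cases h2 : lo < vals.length
      · rw [hstep_none lo h2,
          if_neg (by have := hinadm _ (hvalmem lo h2); omega)]
      · exact hstep_out _ _ (by push_cast; omega)
    rw [he1, he2]
  · -- A picks c: show B's candidate loop ends at exactly c's triple
    rw [hst]
    have hcvals : c ∈ vals := (hmem c).mpr hcmem
    obtain ⟨ic, hicL, hicv⟩ := List.getElem_of_mem hcvals
    by_cases hcp : c < p
    · -- c is left of p: c must be vals[lo-1]
      have hiclo : ic < lo := (hiff ic hicL).mpr (by rw [hicv]; omega)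
      have h1 : 1 ≤ lo := by omega
      have h1L : lo - 1 < vals.length := by omega
      have hv1lt : vals[lo - 1] < p := (hiff (lo - 1) h1L).mp (by omega)
      have hcle : c ≤ vals[lo - 1] := by
        rw [← hicv]
        exact pv_sorted_mono vals hpair hicL h1L (by omega)
      have habs1 : |p - vals[lo - 1]| = p - vals[lo - 1] := abs_of_pos (by omega)
      have habsc : |p - c| = p - c := abs_of_pos (by omega)
      have hd1 : |p - vals[lo - 1]| ≤ |p - c| := by omega
      have hadm1 : |p - vals[lo - 1]| < thr := lt_of_le_of_lt hd1 hadm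
      have hminv1 := hmin vals[lo - 1] (hvalmem _ h1L) hadm1
      have hceq : c = vals[lo - 1] := by
        rcases hminv1 with h | ⟨h, _⟩ <;> omega
      have he1 : pvSnapStep thr vals idx p none ((lo : Int) - 1)
          = some (|p - c|, ((List.idxOf c refs : Nat) : Int), c) := by
        rw [(by omega : ((lo : Int) - 1) = ((lo - 1 : Nat) : Int)), hstep_none (lo - 1) h1L,
          ← hceq, if_pos hadm, hidx c hcmem]
      have he2 : pvSnapStep thr vals idx p
            (some (|p - c|, ((List.idxOf c refs : Nat) : Int), c)) ((lo : Int))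
          = some (|p - c|, ((List.idxOf c refs : Nat) : Int), c) := by
        by_cases h2 : lo < vals.length
        · rw [hstep_some lo h2]
          by_cases hadm2 : |p - vals[lo]| < thr
          · rw [if_pos hadm2]
            have hv2mem := hvalmem lo h2
            have hv2ge : p ≤ vals[lo] := by have := hiff lo h2; omega
            have hvne : vals[lo] ≠ c := by omega
            have hminv2 := hmin vals[lo] hv2mem hadm2
            have hne : List.idxOf vals[lo] refs ≠ List.idxOf c refs :=
              fun h => hvne ((List.idxOf_inj hv2mem).mp h)
            rw [hidx _ hv2mem, if_neg ?_]
            rcases hminv2 with h | ⟨hEq, hIdx⟩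
            · rintro (h2' | ⟨h2', _⟩) <;> omega
            · rintro (h2' | ⟨h2', h3 | ⟨h3, h4⟩⟩) <;> omega
          · rw [if_neg hadm2]
        · exact hstep_out _ _ (by push_cast; omega)
      rw [he1, he2]
    · -- p ≤ c: c must be vals[lo]
      have hple : p ≤ c := by omega
      have hiclo : lo ≤ ic := by
        have := hiff ic hicL
        rw [hicv] at this
        omega
      have h2 : lo < vals.length := by omega
      have hv2ge : p ≤ vals[lo] := by have := hiff lo h2; omega
      have hcge : vals[lo] ≤ c := by
        rw [← hicv]
        exact pv_sorted_mono vals hpair h2 hicL hiclo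
      have habs2 : |p - vals[lo]| = vals[lo] - p := by
        rw [abs_of_nonpos (by omega)]; omega
      have habsc : |p - c| = c - p := by
        rw [abs_of_nonpos (by omega)]; omega
      have hd2 : |p - vals[lo]| ≤ |p - c| := by omega
      have hadm2 : |p - vals[lo]| < thr := lt_of_le_of_lt hd2 hadm
      have hminv2 := hmin vals[lo] (hvalmem _ h2) hadm2
      have hceq : c = vals[lo] := by
        rcases hminv2 with h | ⟨h, _⟩ <;> omega
      -- first candidate: either absent, inadmissible, or beaten by c
      have hfin : pvSnapStep thr vals idx p
            (pvSnapStep thr vals idx p none ((lo : Int) - 1)) ((lo : Int))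
          = some (|p - c|, ((List.idxOf c refs : Nat) : Int), c) := by
        by_cases h1 : 1 ≤ lo
        · have h1L : lo - 1 < vals.length := by omega
          have hv1lt : vals[lo - 1] < p := (hiff (lo - 1) h1L).mp (by omega)
          have hv1mem := hvalmem (lo - 1) h1L
          have he1 := hstep_none (lo - 1) h1L
          by_cases hadm1 : |p - vals[lo - 1]| < thr
          · rw [(by omega : ((lo : Int) - 1) = ((lo - 1 : Nat) : Int)), he1, if_pos hadm1,
              hstep_some lo h2, if_pos hadm2, hidx _ hv1mem, hidx _ (hvalmem _ h2), ← hceq]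
            rw [if_pos ?_]
            have hminv1 := hmin vals[lo - 1] hv1mem hadm1
            have hvne : vals[lo - 1] ≠ c := by omega
            have hne : List.idxOf vals[lo - 1] refs ≠ List.idxOf c refs :=
              fun h => hvne ((List.idxOf_inj hv1mem).mp h)
            rcases hminv1 with h | ⟨hEq, hIdx⟩
            · left; omega
            · right
              exact ⟨by omega, Or.inl (by omega)⟩
          · rw [(by omega : ((lo : Int) - 1) = ((lo - 1 : Nat) : Int)), he1, if_neg hadm1,
              hstep_none lo h2, ← hceq, if_pos hadm, hidx c hcmem]
        · rw [hstep_out none ((lo : Int) - 1) (by omega), hstep_none lo h2, ← hceq,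
            if_pos hadm, hidx c hcmem]
      rw [hfin]

theorem pv_main : ∀ (A : List (Int × Int)) (B : List (Int × Int)) (distance_threshold : Int),
    update_exons A B distance_threshold = update_exons_alt A B distance_threshold := by
  intro A B t
  unfold update_exons update_exons_alt
  by_cases hA : PySem.List.len A = 0
  · rw [if_pos hA, if_pos hA]
  · rw [if_neg hA, if_neg hA]
    by_cases hB : PySem.List.len B = 1
    · rw [if_pos hB, if_pos hB]
    · rw [if_neg hB, if_neg hB]
      dsimp only
      rw [PySem.List.foldl_append_eq_flatMap (fun seg => [seg.1, seg.2]) B []]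
      rw [List.nil_append]
      rw [PySem.List.foldl_append_singleton_eq_map
        (fun se => (pvCorrectPoint t (B.flatMap fun seg => [seg.1, seg.2]) se.1,
                    pvCorrectPoint t (B.flatMap fun seg => [seg.1, seg.2]) se.2)) A []]
      rw [List.nil_append]
      rw [pvBuildIdx_keys]
      have hsnap : (fun se : Int × Int =>
          (pvSnap t (PySem.List.sorted (PySem.Set.ofList (B.flatMap fun seg => [seg.1, seg.2])) (fun x => x) false)
              (pvBuildIdx (B.flatMap fun seg => [seg.1, seg.2])) se.1,
           pvSnap t (PySem.List.sorted (PySem.Set.ofList (B.flatMap fun seg => [seg.1, seg.2])) (fun x => x) false)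
              (pvBuildIdx (B.flatMap fun seg => [seg.1, seg.2])) se.2))
          = (fun se : Int × Int =>
          (pvCorrectPoint t (B.flatMap fun seg => [seg.1, seg.2]) se.1,
           pvCorrectPoint t (B.flatMap fun seg => [seg.1, seg.2]) se.2)) := by
        funext se
        rw [pvSnap_eq, pvSnap_eq]
      rw [hsnap]
      unfold pvPartitionA
      dsimp only
      rw [pvPartStep_eq]

-- ===== VERDICT (by name: the statement is the Claim_ definition above) =====
theorem update_exons_spec : Claim_equal_update_exons := by
  intro A B t _ _
  unfold Spec_update_exons
  exact pv_main A B t
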